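-- pv_equiv track=rewrite | github.com/yeahzizi/algorithm | 프로그래머스/level 2/PR. level2. 스킬트리.py | check
-- ===== SOURCE A (Python) =====
-- def check(word, skill):
--     now, idx = skill[0], 0
--     for i in word:
--         if i in skill and now != i:
--             return 0
--         elif i == now:
--             if idx + 1 == len(skill):
--                 return 1
--             now, idx = skill[idx + 1], idx + 1
--     return 1
-- ===== SOURCE B (Python) =====
-- def check(word, skill):
--     filtered = [c for c in word if c in skill][:len(skill)]
--     return 1 if filtered == list(skill[:len(filtered)]) else 0
-- ===== Notes on version B (the rewrite author's own statement) =====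
-- stated objective: simpler
-- what changed: Replaces the single-pass state machine (tracking the expected skill char and index with three branches and early returns) by a two-pass filter-then-compare: collect the skill characters of word, truncate to len(skill), and test that they form a prefix of skill.
import Mathlib
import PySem

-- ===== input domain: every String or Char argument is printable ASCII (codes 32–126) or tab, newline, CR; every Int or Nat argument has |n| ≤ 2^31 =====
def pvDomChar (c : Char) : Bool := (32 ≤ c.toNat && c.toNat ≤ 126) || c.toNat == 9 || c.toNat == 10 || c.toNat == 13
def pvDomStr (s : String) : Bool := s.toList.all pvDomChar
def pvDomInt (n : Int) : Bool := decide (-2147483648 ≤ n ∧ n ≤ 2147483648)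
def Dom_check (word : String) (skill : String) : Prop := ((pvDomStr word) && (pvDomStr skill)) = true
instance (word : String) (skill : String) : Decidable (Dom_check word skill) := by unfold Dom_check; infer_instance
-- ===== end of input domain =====

-- B replaces A's single-pass state machine by a filter-then-compare decomposition (objective: simpler).

-- ===== PORT A =====
-- the for-loop over word: state (now, idx); branches in A's order
def checkLoop (sk : List Char) : List Char → Char → Nat → Int
  | [], _, _ => 1
  | i :: rest, now, idx =>
    if i ∈ sk ∧ now ≠ i then 0
    else if i = now then
      if idx + 1 = sk.length then 1
      else checkLoop sk rest (sk.getD (idx + 1) now) (idx + 1)   -- skill[idx+1]: in range here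
    else checkLoop sk rest now idx

def check (word : String) (skill : String) : Int :=
  match skill.toList with
  | [] => 0                    -- skill[0] raises IndexError; excluded by Pre_check
  | c :: _ => checkLoop skill.toList word.toList c 0   -- now = skill[0], idx = 0

-- ===== PORT B =====
def check_alt (word : String) (skill : String) : Int :=
  let sk := skill.toList
  let filtered := (word.toList.filter (fun c => decide (c ∈ sk))).take sk.length
  if filtered = sk.take filtered.length then 1 else 0

-- ===== PRECONDITION & SPEC =====
-- A evaluates skill[0] before the loop, so it raises IndexError on empty skill.
def Pre_check (word : String) (skill : String) : Prop := skill ≠ ""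
instance (word : String) (skill : String) : Decidable (Pre_check word skill) := by unfold Pre_check; infer_instance
def pvWitness_check : String × String := ("CBD", "CBD")

def Spec_check (word : String) (skill : String) (out : Int) : Prop := out = check_alt word skill
instance (word : String) (skill : String) (out : Int) : Decidable (Spec_check word skill out) := by unfold Spec_check; infer_instance

-- ===== CLAIM (what is proved, stated in full; the proofs are below) =====
def Claim_equal_check : Prop := ∀ (word : String) (skill : String), Dom_check word skill → Pre_check word skill → Spec_check word skill (check word skill)
-- ===== LEMMAS AND PROOFS =====

-- loop invariant: from state (skill[idx], idx) the machine accepts iff the next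
-- (len(skill) - idx) skill-characters of the remaining word are a prefix of skill.drop idx
lemma checkLoop_eq (sk : List Char) (ws : List Char) : ∀ (idx : Nat) (h : idx < sk.length),
    checkLoop sk ws sk[idx] idx =
      (if ((ws.filter (fun c => decide (c ∈ sk))).take (sk.length - idx)) =
          (sk.drop idx).take ((ws.filter (fun c => decide (c ∈ sk))).take (sk.length - idx)).length
       then 1 else 0) := by
  induction ws with
  | nil => intro idx h; simp [checkLoop]
  | cons i rest ih =>
    intro idx h
    have hdrop : sk.drop idx = sk[idx] :: sk.drop (idx + 1) := List.drop_eq_getElem_cons h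
    by_cases hm : i ∈ sk
    · by_cases he : i = sk[idx]
      · subst he
        by_cases hlast : idx + 1 = sk.length
        · -- completion: A returns 1 immediately
          have h1 : sk.length - idx = 1 := by omega
          simp [checkLoop, hlast, List.filter, hm, h1, hdrop]
        · have hlt : idx + 1 < sk.length := by omega
          have hsub : sk.length - idx = (sk.length - (idx + 1)) + 1 := by omega
          have hget : sk.getD (idx + 1) sk[idx] = sk[idx + 1] := List.getD_eq_getElem sk _ hlt
          rw [show checkLoop sk (sk[idx] :: rest) sk[idx] idx
                = checkLoop sk rest (sk.getD (idx + 1) sk[idx]) (idx + 1) by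
              simp [checkLoop, hlast]]
          rw [hget, ih (idx + 1) hlt]
          simp only [List.filter, hm, decide_true, hsub, List.take_succ_cons, hdrop,
            List.length_cons]
          simp only [List.cons.injEq, true_and]
      · -- wrong skill char: both return 0
        have h0 : checkLoop sk (i :: rest) sk[idx] idx = 0 := by
          simp [checkLoop, hm, Ne.symm he]
        rw [h0]
        have h1 : 1 ≤ sk.length - idx := by omega
        rw [show sk.length - idx = (sk.length - idx - 1) + 1 by omega]
        simp only [List.filter, hm, decide_true, List.take_succ_cons, hdrop, List.length_cons]
        rw [if_neg]
        intro hcontra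
        exact he (List.cons_eq_cons.mp hcontra).1
    · -- i not a skill char: skipped on both sides
      have hne : i ≠ sk[idx] := fun he => hm (he ▸ sk.getElem_mem h)
      have hstep : checkLoop sk (i :: rest) sk[idx] idx = checkLoop sk rest sk[idx] idx := by
        simp [checkLoop, hm, hne]
      rw [hstep, ih idx h]
      simp [List.filter, hm]

-- ===== VERDICT (by name: the statement is the Claim_ definition above) =====
theorem check_spec : Claim_equal_check := by
  intro word skill _ hpre
  unfold Spec_check check check_alt
  obtain ⟨c, t, hsk⟩ : ∃ c t, skill.toList = c :: t := by
    cases h : skill.toList with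
    | nil =>
      exfalso; apply hpre
      have := congrArg String.ofList h
      simpa using this
    | cons c t => exact ⟨c, t, rfl⟩
  rw [hsk]
  have hkey := checkLoop_eq (c :: t) word.toList 0 (by simp)
  simp only [List.getElem_cons_zero, Nat.sub_zero, List.drop_zero] at hkey
  simpa using hkey
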